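-- pv_equiv track=rewrite | github.com/shawwn/mega | mega.py | make_morton_table
-- ===== SOURCE A (Python) =====
-- import math
--
-- def make_morton_table(n=2048):
--   # // generate the morton table that's used to address individual
--   # // ubertexture tiles.
--   # unsigned int mortonTable[ 2048 ];
--   mortonTable = [0] * n
--   # for ( unsigned int i = 0; i < 2048; ++i )
--   # {
--   for i in range(n):
--     # mortonTable[ i ] = 0;
--     mortonTable[i] = 0
--     # unsigned int mask = 1;
--     mask = 1
--     # for ( unsigned int b = 0; b < 11; ++b, mask += mask )
--     #   mortonTable[ i ] |= ( i & mask ) << b;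
--     b = 0
--     while b < math.log2(n):
--       mortonTable[ i ] |= ( i & mask ) << b;
--       b += 1
--       mask += mask
--   # }
--   return mortonTable
-- ===== SOURCE B (Python) =====
-- def make_morton_table(n=2048):
--   # Dynamic programming: spread(i) = (spread(i >> 1) << 2) | (i & 1),
--   # so each entry is computed from an earlier one in O(1).
--   table = []
--   for i in range(n):
--     if i < 2:
--       table.append(i)
--     else:
--       table.append((table[i >> 1] << 2) | (i & 1))
--   return table
-- ===== Notes on version B (the rewrite author's own statement) =====
-- stated objective: faster
-- what changed: Replaces the per-index inner bit-by-bit interleaving loop (with a float log2 bound test each iteration) by an O(1) dynamic-programming recurrence spread(i) = (spread(i>>1) << 2) | (i & 1) reusing earlier table entries.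
import Mathlib
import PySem

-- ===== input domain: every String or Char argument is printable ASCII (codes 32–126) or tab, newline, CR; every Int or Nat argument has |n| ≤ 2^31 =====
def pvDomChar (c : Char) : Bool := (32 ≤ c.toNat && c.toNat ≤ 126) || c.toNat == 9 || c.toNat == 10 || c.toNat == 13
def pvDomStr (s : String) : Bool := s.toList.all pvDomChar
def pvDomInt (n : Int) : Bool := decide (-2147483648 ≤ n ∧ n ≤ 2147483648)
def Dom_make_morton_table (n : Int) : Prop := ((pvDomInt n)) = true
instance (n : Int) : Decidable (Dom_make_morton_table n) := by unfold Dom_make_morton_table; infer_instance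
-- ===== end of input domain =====

-- B replaces A's per-index bit-by-bit interleaving loop by the DP recurrence
-- spread(i) = (spread(i >> 1) << 2) | (i & 1) over earlier table entries (O(n) vs O(n log n)).

-- ===== PORT A =====
-- Inner 'while b < math.log2(n)' loop of A, carrying table[i] as acc.
-- The float condition 'b < math.log2(n)' (integers b, n) is ported exactly as '2^b < n'
-- (b < log2 n ⟺ 2^b < n; a double log2 cannot round across an integer for |n| ≤ 2^31).
def mortonInnerA (n i acc mask : Int) (b : Nat) : Int :=
  if 2 ^ b < n then
    mortonInnerA n i (PySem.Int.bor acc ((PySem.Int.band i mask) <<< b)) (mask + mask) (b + 1)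
  else acc
termination_by (n - 2 ^ b).toNat
decreasing_by
  have h1 : (0:Int) < 2 ^ b := by positivity
  simp only [pow_succ]
  omega

-- mortonTable = [0]*n, then for i in range(n): mortonTable[i] = <inner loop value>
-- (the index i is 0 ≤ i < n, so List.set at i.toNat is Python's in-range assignment).
def make_morton_table (n : Int) : List Int :=
  (PySem.List.pyRange 0 n 1).foldl
    (fun tbl i => tbl.set i.toNat (mortonInnerA n i 0 1 0))
    (List.replicate n.toNat 0)

-- ===== PORT B =====
-- table[i >> 1] is always in range (i >> 1 < i = len(table) for i ≥ 2), so the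
-- pyGet? (IndexError = none) is defaulted with getD; the default is never used.
def make_morton_table_alt (n : Int) : List Int :=
  (PySem.List.pyRange 0 n 1).foldl
    (fun table i =>
      table ++ [if i < 2 then i
        else PySem.Int.bor (((PySem.List.pyGet? table (i >>> (1:Nat))).getD 0) <<< (2:Nat))
               (PySem.Int.band i 1)])
    []

-- ===== PRECONDITION & SPEC =====
def Spec_make_morton_table (n : Int) (out : List Int) : Prop := out = make_morton_table_alt n
instance (n : Int) (out : List Int) : Decidable (Spec_make_morton_table n out) := by unfold Spec_make_morton_table; infer_instance

-- ===== CLAIM (what is proved, stated in full; the proofs are below) =====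
def Claim_equal_make_morton_table : Prop := ∀ (n : Int), Dom_make_morton_table n → Spec_make_morton_table n (make_morton_table n)

-- ===== LEMMAS AND PROOFS =====

-- Morton spread: bits of m moved to the even positions.
def spread (m : Nat) : Nat :=
  if h : m = 0 then 0 else 4 * spread (m / 2) + m % 2
termination_by m
decreasing_by exact Nat.div_lt_self (Nat.pos_of_ne_zero h) (by norm_num)

lemma spread_zero : spread 0 = 0 := by rw [spread]; rfl

lemma spread_rec (m : Nat) : spread m = 4 * spread (m / 2) + m % 2 := by
  rw [spread]
  split_ifs with h
  · subst h; simp [spread_zero]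
  · rfl

lemma spread_lt {b m : Nat} (h : m < 2 ^ b) : spread m < 4 ^ b := by
  induction b generalizing m with
  | zero =>
    have : m = 0 := by simpa using h
    subst this; simp [spread_zero]
  | succ b ih =>
    have hp : (2:Nat) ^ (b+1) = 2 * 2 ^ b := by ring
    have h2 : m / 2 < 2 ^ b := by omega
    have h3 := ih h2
    have hq : (4:Nat) ^ (b+1) = 4 * 4 ^ b := by ring
    rw [spread_rec]
    omega

lemma spread_add (b : Nat) : ∀ m c, m < 2 ^ b → spread (m + 2 ^ b * c) = spread m + 4 ^ b * spread c := by
  induction b with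
  | zero =>
    intro m c h
    have : m = 0 := by simpa using h
    subst this; simp [spread_zero]
  | succ b ih =>
    intro m c h
    have hp : (2:Nat) ^ (b+1) = 2 * 2 ^ b := by ring
    have hdiv : (m + 2 ^ (b+1) * c) / 2 = m / 2 + 2 ^ b * c := by
      rw [hp, mul_assoc]
      exact Nat.add_mul_div_left m _ (by norm_num)
    have hmod : (m + 2 ^ (b+1) * c) % 2 = m % 2 := by
      rw [hp, mul_assoc]
      exact Nat.add_mul_mod_self_left m 2 _
    rw [spread_rec (m + 2 ^ (b+1) * c), hdiv, hmod, ih (m / 2) c (by omega),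
      spread_rec m]
    have hq : (4:Nat) ^ (b+1) = 4 * 4 ^ b := by ring
    rw [hq]; ring

-- disjoint OR is addition: the low part a sits below the 2^k-aligned part
lemma or_two_pow_mul {k a c : Nat} (h : a < 2 ^ k) : a ||| 2 ^ k * c = a + 2 ^ k * c := by
  apply Nat.eq_of_testBit_eq
  intro j
  rw [Nat.testBit_or]
  by_cases hj : j < k
  · have hx : (2 ^ k * c).testBit j = false := by
      rw [Nat.testBit_two_pow_mul]
      simp [Nat.not_le.mpr hj]
    have hsum : (a + 2 ^ k * c).testBit j = a.testBit j := by
      rw [Nat.testBit_eq_decide_div_mod_eq, Nat.testBit_eq_decide_div_mod_eq]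
      have hkj : (2:Nat) ^ k = 2 ^ j * 2 ^ (k - j) := by
        rw [← pow_add]; congr 1; omega
      have hdiv : (a + 2 ^ k * c) / 2 ^ j = a / 2 ^ j + 2 ^ (k - j) * c := by
        rw [hkj, mul_assoc]
        exact Nat.add_mul_div_left a _ (by positivity)
      have hm : (a / 2 ^ j + 2 ^ (k - j) * c) % 2 = a / 2 ^ j % 2 := by
        have : (2:Nat) ^ (k - j) = 2 * 2 ^ (k - j - 1) := by
          rw [← pow_succ']; congr 1; omega
        rw [this, mul_assoc]
        exact Nat.add_mul_mod_self_left _ 2 _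
      rw [hdiv, hm]
    rw [hsum, hx, Bool.or_false]
  · have ha : a.testBit j = false :=
      Nat.testBit_lt_two_pow (lt_of_lt_of_le h (Nat.pow_le_pow_right (by norm_num) (by omega)))
    have hsum : (a + 2 ^ k * c).testBit j = (2 ^ k * c).testBit j := by
      rw [Nat.testBit_eq_decide_div_mod_eq, Nat.testBit_two_pow_mul]
      have hdivk : (a + 2 ^ k * c) / 2 ^ k = c := by
        rw [Nat.add_mul_div_left a c (by positivity), Nat.div_eq_of_lt h, Nat.zero_add]
      have hjk : (2:Nat) ^ j = 2 ^ k * 2 ^ (j - k) := by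
        rw [← pow_add]; congr 1; omega
      rw [hjk, ← Nat.div_div_eq_div_mul, hdivk]
      simp [Nat.testBit_eq_decide_div_mod_eq, Nat.le_of_not_lt hj, ge_iff_le]
    rw [hsum, ha, Bool.false_or]

lemma spread_one : spread 1 = 1 := by rw [spread_rec]; simp [spread_zero]

lemma spread_small {m : Nat} (h : m < 2) : spread m = m := by
  interval_cases m
  · exact spread_zero
  · exact spread_one

-- step of the inner loop: OR-ing in bit b extends the spread of the low b bits
lemma spread_step (M b : Nat) :
    spread (M % 2 ^ b) ||| (M &&& 2 ^ b) <<< b = spread (M % 2 ^ (b + 1)) := by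
  have hbit : M &&& 2 ^ b = (M.testBit b).toNat * 2 ^ b := Nat.and_two_pow M b
  set r : Nat := (M.testBit b).toNat with hr
  have hrlt : r < 2 := by rw [hr]; cases M.testBit b <;> simp
  have hmod : M % 2 ^ (b + 1) = M % 2 ^ b + 2 ^ b * r := by
    have hp : (2:Nat) ^ (b+1) = 2 ^ b * 2 := by ring
    have hbit' : r = M / 2 ^ b % 2 := by
      rw [hr, Nat.testBit_eq_decide_div_mod_eq]
      rcases Nat.mod_two_eq_zero_or_one (M / 2 ^ b) with h | h <;> simp [h]
    rw [hp, Nat.mod_mul, hbit']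
  have hlt : spread (M % 2 ^ b) < 4 ^ b := spread_lt (Nat.mod_lt _ (by positivity))
  have h4 : (4:Nat) ^ b = 2 ^ (2 * b) := by
    rw [show (4:Nat) = 2 ^ 2 by norm_num, ← pow_mul]
  have hshift : (M &&& 2 ^ b) <<< b = 2 ^ (2 * b) * r := by
    rw [hbit, Nat.shiftLeft_eq, show (2:Nat) ^ (2 * b) = 2 ^ b * 2 ^ b by
      rw [two_mul, pow_add]]
    ring
  have hlt2 : spread (M % 2 ^ b) < 2 ^ (2 * b) := h4 ▸ hlt
  rw [hshift, or_two_pow_mul hlt2, hmod,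
    spread_add b _ r (Nat.mod_lt _ (by positivity)), spread_small hrlt, h4]

-- the inner loop computes the full Morton spread of i
lemma mortonInnerA_spec (t : Nat) : ∀ (n i : Int) (b : Nat), n ≤ 2 ^ (b + t) → 0 ≤ i → i < n →
    mortonInnerA n i ((spread (i.toNat % 2 ^ b) : Nat) : Int) ((2:Int) ^ b) b = ((spread i.toNat : Nat) : Int) := by
  induction t with
  | zero =>
    intro n i b hle hi hin
    rw [mortonInnerA]
    have hb0 : (2:Int) ^ (b + 0) = 2 ^ b := by norm_num
    have hstop : ¬ (2:Int) ^ b < n := by omega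
    rw [if_neg hstop]
    congr 1
    apply congrArg
    apply Nat.mod_eq_of_lt
    have h2 : (2:Int) ^ b = ((2 ^ b : Nat) : Int) := by push_cast; ring
    omega
  | succ t ih =>
    intro n i b hle hi hin
    rw [mortonInnerA]
    by_cases hc : (2:Int) ^ b < n
    · rw [if_pos hc]
      have h2 : (2:Int) ^ b = ((2 ^ b : Nat) : Int) := by push_cast; ring
      have hi' : i = ((i.toNat : Nat) : Int) := by omega
      have hacc : PySem.Int.bor ((spread (i.toNat % 2 ^ b) : Nat) : Int)
          ((PySem.Int.band i ((2:Int) ^ b)) <<< b)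
          = ((spread (i.toNat % 2 ^ (b + 1)) : Nat) : Int) := by
        rw [hi', h2, PySem.Int.band_natCast]
        rw [Int.shiftLeft_eq, show ((i.toNat &&& 2 ^ b : Nat) : Int) * 2 ^ b
            = (((i.toNat &&& 2 ^ b) <<< b : Nat) : Int) by rw [Nat.shiftLeft_eq]; push_cast; ring]
        rw [PySem.Int.bor_natCast]
        simp only [Int.toNat_natCast]
        rw [spread_step]
      rw [hacc, show (2:Int) ^ b + 2 ^ b = 2 ^ (b + 1) by ring]
      exact ih n i (b + 1) (by rw [show b + 1 + t = b + (t + 1) by ring]; exact hle) hi hin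
    · rw [if_neg hc]
      congr 1
      apply congrArg
      apply Nat.mod_eq_of_lt
      have h2 : (2:Int) ^ b = ((2 ^ b : Nat) : Int) := by push_cast; ring
      omega

lemma mortonInnerA_full (n i : Int) (hi : 0 ≤ i) (hin : i < n) :
    mortonInnerA n i 0 1 0 = ((spread i.toNat : Nat) : Int) := by
  have h := mortonInnerA_spec n.toNat n i 0 (by
    have h1 : n.toNat < 2 ^ n.toNat := Nat.lt_two_pow_self
    have h2 : (2:Int) ^ (0 + n.toNat) = ((2 ^ n.toNat : Nat) : Int) := by
      rw [Nat.zero_add]; push_cast; ring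
    omega) hi hin
  simpa [Nat.mod_one, spread_zero] using h

-- folding index-wise set over range fills the table like a map
lemma foldl_set_aux (g : Int → Int) :
    ∀ (l : List Int) (t : List Int) (x : Int), (∀ i ∈ l, 0 ≤ i ∧ i.toNat < t.length) →
      l.foldl (fun tbl i => tbl.set i.toNat (g i)) (t ++ [x])
        = l.foldl (fun tbl i => tbl.set i.toNat (g i)) t ++ [x] := by
  intro l
  induction l with
  | nil => intro t x _; rfl
  | cons i l ih =>
    intro t x h
    have hi := h i (List.mem_cons_self)
    simp only [List.foldl_cons]
    rw [List.set_append_left _ _ hi.2]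
    exact ih _ x (fun j hj => by
      have := h j (List.mem_cons_of_mem _ hj)
      simpa [List.length_set] using this)

lemma foldl_set_range (g : Int → Int) (N : Nat) :
    ((List.range N).map (fun k : Nat => (k : Int))).foldl
        (fun tbl i => tbl.set i.toNat (g i)) (List.replicate N 0)
      = (List.range N).map (fun k : Nat => g k) := by
  induction N with
  | zero => rfl
  | succ N ih =>
    rw [List.range_succ, List.map_append, List.map_append, List.foldl_append,
      List.replicate_succ', foldl_set_aux g _ _ _ (fun i hi => by
        simp only [List.mem_map, List.mem_range] at hi
        obtain ⟨k, hk, rfl⟩ := hi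
        constructor
        · positivity
        · simpa using hk), ih]
    simp only [List.map_cons, List.map_nil, List.foldl_cons, List.foldl_nil]
    rw [List.set_append_right _ _ (by simp)]
    simp

-- A computes the spread table
lemma make_morton_table_eq_map (n : Int) :
    make_morton_table n = (List.range n.toNat).map (fun k : Nat => ((spread k : Nat) : Int)) := by
  unfold make_morton_table
  rw [PySem.List.pyRange_one]
  simp only [sub_zero, zero_add]
  have : (List.map (fun k : Nat => (k : Int)) (List.range n.toNat)).foldl
        (fun tbl i => tbl.set i.toNat (mortonInnerA n i 0 1 0)) (List.replicate n.toNat 0)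
      = (List.range n.toNat).map (fun k : Nat => mortonInnerA n k 0 1 0) :=
    foldl_set_range (fun i => mortonInnerA n i 0 1 0) n.toNat
  rw [this]
  apply List.map_congr_left
  intro k hk
  rw [List.mem_range] at hk
  have hkn : ((k : Int)) < n := by omega
  rw [mortonInnerA_full n k (by positivity) hkn]
  simp

-- B computes the spread table
lemma make_morton_table_alt_eq_map (n : Int) :
    make_morton_table_alt n = (List.range n.toNat).map (fun k : Nat => ((spread k : Nat) : Int)) := by
  unfold make_morton_table_alt
  rw [PySem.List.pyRange_one]
  simp only [sub_zero, zero_add]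
  induction n.toNat with
  | zero => rfl
  | succ N ih =>
    rw [List.range_succ, List.map_append, List.map_append, List.foldl_append, ih]
    simp only [List.map_cons, List.map_nil, List.foldl_cons, List.foldl_nil]
    by_cases hN : (N : Int) < 2
    · have hN2 : N < 2 := by omega
      rw [if_pos hN]
      congr 1
      rw [spread_small hN2]
    · have hN2 : ¬ N < 2 := by omega
      rw [if_neg hN]
      have hjr : ((N : Int) >>> (1:Nat)) = ((N / 2 : Nat) : Int) := by
        rw [Int.shiftRight_eq_div_pow]
        push_cast
        omega
      have hget : (PySem.List.pyGet?
            ((List.range N).map (fun k : Nat => ((spread k : Nat) : Int))) ((N : Int) >>> (1:Nat))).getD 0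
          = ((spread (N / 2) : Nat) : Int) := by
        rw [hjr, PySem.List.pyGet?_natCast]
        rw [List.getElem?_map]
        rw [List.getElem?_range (by omega)]
        rfl
      rw [hget]
      congr 1
      rw [Int.shiftLeft_eq, show ((spread (N / 2) : Nat) : Int) * 2 ^ (2:Nat)
          = ((spread (N / 2) * 2 ^ 2 : Nat) : Int) by push_cast; ring]
      have hb1 : PySem.Int.band (N : Int) 1 = ((N &&& 1 : Nat) : Int) := by
        simpa using PySem.Int.band_natCast N 1
      rw [hb1, PySem.Int.bor_natCast]
      congr 1
      have hand : N &&& 1 = N % 2 := Nat.and_one_is_mod N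
      rw [hand, Nat.or_comm, show spread (N / 2) * 2 ^ 2 = 2 ^ 2 * spread (N / 2) by ring,
        or_two_pow_mul (by omega)]
      rw [spread_rec N]
      ring

-- ===== VERDICT (by name: the statement is the Claim_ definition above) =====
theorem make_morton_table_spec : Claim_equal_make_morton_table := by
  intro n _
  unfold Spec_make_morton_table
  rw [make_morton_table_eq_map, make_morton_table_alt_eq_map]
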